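-- pv_equiv track=rewrite | github.com/trilinos/Trilinos | packages/PyTrilinos2/scripts/gather_includes.py | get_angular_include
-- ===== SOURCE A (Python) =====
-- def get_without_subfolder(line):
--     last_index=-1
--     for i in range(len(line)):
--         if line[i] == '/':
--             last_index = i
--         if line[i] == '<':
--             first_index = i
--     if last_index == -1:
--         return line
--     return line[:first_index+1]+line[last_index+1:]
--
-- def get_angular_include(line, remove_subfolder=False):
--     first=True
--     i0 = 0
--     i1 = 0
--     newline = line
--     for i in range(len(newline)):
--         if newline[i] == '"':
--             if first:
--                 if newline[i+1] == '.':
--                     return line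
--                 newline = newline[:i] + '<' + newline[i+1:]
--                 first = False
--                 i0 = i+1
--             else:
--                 newline = newline[:i] + '>' + newline[i+1:]
--                 i1 = i
--     if newline[i0:i1] in ['storage_class.h', 'cuda_cc7_asm_atomic_op.inc_predicate', 'cuda_cc7_asm_atomic_fetch_op.inc_predicate']:
--         return line
--     if remove_subfolder:
--         return get_without_subfolder(newline)
--     return newline
-- ===== SOURCE B (Python) =====
-- def get_without_subfolder(line):
--     slash = line.rfind('/')
--     if slash == -1:
--         return line
--     angle = line.rindex('<')
--     return line[:angle + 1] + line[slash + 1:]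
--
-- def get_angular_include(line, remove_subfolder=False):
--     f = line.find('"')
--     if f == -1:
--         i0 = i1 = 0
--         newline = line
--     else:
--         if line[f + 1] == '.':
--             return line
--         i0 = f + 1
--         i1 = line.rfind('"')
--         newline = line[:f] + '<' + ''.join('>' if c == '"' else c for c in line[f + 1:])
--     if newline[i0:i1] in ['storage_class.h', 'cuda_cc7_asm_atomic_op.inc_predicate',
--                           'cuda_cc7_asm_atomic_fetch_op.inc_predicate']:
--         return line
--     if remove_subfolder:
--         return get_without_subfolder(newline)
--     return newline
-- ===== Notes on version B (the rewrite author's own statement) =====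
-- stated objective: simpler
-- what changed: Replaces A's stateful index loop that rebuilds the whole string at every quote (and A's last-occurrence tracking loop in the helper) with direct position computation: find/rfind locate the first and last quote, one join pass rewrites the remaining quotes to closing angle brackets, and the helper uses rfind/rindex instead of a scanning loop.
import Mathlib
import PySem

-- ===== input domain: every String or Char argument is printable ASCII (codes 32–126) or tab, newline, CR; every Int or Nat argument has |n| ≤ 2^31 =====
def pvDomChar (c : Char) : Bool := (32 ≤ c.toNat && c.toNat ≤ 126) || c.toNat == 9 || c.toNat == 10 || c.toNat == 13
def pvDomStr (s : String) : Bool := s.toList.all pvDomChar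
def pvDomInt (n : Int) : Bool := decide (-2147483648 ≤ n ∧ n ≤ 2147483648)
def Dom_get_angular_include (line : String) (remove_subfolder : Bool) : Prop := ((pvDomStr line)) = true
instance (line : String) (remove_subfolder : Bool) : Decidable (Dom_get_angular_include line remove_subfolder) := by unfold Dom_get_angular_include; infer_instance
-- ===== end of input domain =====

-- B replaces A's stateful rebuild-the-string index loops by direct find/rfind position computation
-- plus one map pass over the tail; objective: simpler. Equivalence is of return values on Pre_.

-- ===== PORT A =====

-- state of A's main for-loop: (first, i0, i1, newline); none = the early `return line` was taken
def gaiStepA (st : Option (Bool × Nat × Nat × List Char)) (i : Nat) : Option (Bool × Nat × Nat × List Char) :=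
  match st with
  | none => none
  | some (first, i0, i1, nl) =>
    if nl.getD i ' ' = '"' then                    -- newline[i], i always in range here
      if first then
        if nl.getD (i+1) ' ' = '.' then none       -- newline[i+1]; out of range = IndexError, excluded by Pre_
        else some (false, i+1, i1, nl.take i ++ '<' :: nl.drop (i+1))  -- newline[:i] + '<' + newline[i+1:]
      else some (first, i0, i, nl.take i ++ '>' :: nl.drop (i+1))      -- newline[:i] + '>' + newline[i+1:]
    else some (first, i0, i1, nl)

-- A's get_without_subfolder loop: (last_index, first_index); first_index none = Python's unbound local
def gwsStep (cs : List Char) (st : Int × Option Nat) (i : Nat) : Int × Option Nat :=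
  let st1 := if cs.getD i ' ' = '/' then ((i : Int), st.2) else st   -- line[i] == '/'
  if cs.getD i ' ' = '<' then (st1.1, some i) else st1              -- line[i] == '<'

def gwsLoop (cs : List Char) : Int × Option Nat :=
  (List.range cs.length).foldl (gwsStep cs) (-1, none)

def get_without_subfolder (cs : List Char) : List Char :=
  let st := gwsLoop cs
  if st.1 = -1 then cs
  else cs.take (st.2.getD 0 + 1) ++ cs.drop (st.1.toNat + 1)
  -- st.2 = none here ⇔ Python raises UnboundLocalError; excluded by Pre_

def get_angular_include (line : String) (remove_subfolder : Bool) : String :=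
  let cs := line.toList
  match (List.range cs.length).foldl gaiStepA (some (true, 0, 0, cs)) with
  | none => line
  | some (_, i0, i1, nl) =>
    if PySem.List.slice nl (some (i0 : Int)) (some (i1 : Int)) ∈
        ["storage_class.h".toList, "cuda_cc7_asm_atomic_op.inc_predicate".toList,
         "cuda_cc7_asm_atomic_fetch_op.inc_predicate".toList] then line
    else if remove_subfolder then String.ofList (get_without_subfolder nl)
    else String.ofList nl

-- ===== PORT B =====

def gws_alt (cs : List Char) : List Char :=
  let slash := PySem.Chars.rfind cs ['/']
  if slash = -1 then cs
  else
    let angle := PySem.Chars.rfind cs ['<']      -- rindex: -1 ⇔ ValueError, excluded by Pre_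
    cs.take (angle.toNat + 1) ++ cs.drop (slash.toNat + 1)

def get_angular_include_alt (line : String) (remove_subfolder : Bool) : String :=
  let cs := line.toList
  let finish : Nat → Nat → List Char → String := fun i0 i1 nl =>
    if PySem.List.slice nl (some (i0 : Int)) (some (i1 : Int)) ∈
        ["storage_class.h".toList, "cuda_cc7_asm_atomic_op.inc_predicate".toList,
         "cuda_cc7_asm_atomic_fetch_op.inc_predicate".toList] then line
    else if remove_subfolder then String.ofList (gws_alt nl)
    else String.ofList nl
  let f := PySem.Chars.find cs ['"']
  if f = -1 then finish 0 0 cs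
  else if (PySem.List.pyGet? cs (f + 1)).getD ' ' = '.' then line   -- line[f+1]; none = IndexError, excluded by Pre_
  else finish (f.toNat + 1) (PySem.Chars.rfind cs ['"']).toNat
        (cs.take f.toNat ++ '<' ::
          PySem.Chars.join [] ((cs.drop (f.toNat + 1)).map (fun c => [if c = '"' then '>' else c])))

-- ===== PRECONDITION & SPEC =====
-- Pre_ excludes exactly the inputs on which A raises: (1) the first double quote is the last
-- character of the line (IndexError on newline[i+1]); (2) remove_subfolder set with a slash but
-- no double quote and no left angle bracket in the line (UnboundLocalError on first_index).
def Pre_get_angular_include (line : String) (remove_subfolder : Bool) : Prop :=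
  ¬ (line.toList.getLast? = some '"' ∧ '"' ∉ line.toList.dropLast) ∧
  ¬ (remove_subfolder = true ∧ '/' ∈ line.toList ∧ '"' ∉ line.toList ∧ '<' ∉ line.toList)
instance (line : String) (remove_subfolder : Bool) : Decidable (Pre_get_angular_include line remove_subfolder) := by
  unfold Pre_get_angular_include; infer_instance

def pvWitness_get_angular_include : String × Bool := ("#include \"sub/x.hpp\"", true)

def Spec_get_angular_include (line : String) (remove_subfolder : Bool) (out : String) : Prop := out = get_angular_include_alt line remove_subfolder
instance (line : String) (remove_subfolder : Bool) (out : String) : Decidable (Spec_get_angular_include line remove_subfolder out) := by unfold Spec_get_angular_include; infer_instance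

-- ===== CLAIM (what is proved, stated in full; the proofs are below) =====
def Claim_equal_get_angular_include : Prop := ∀ (line : String) (remove_subfolder : Bool), Dom_get_angular_include line remove_subfolder → Pre_get_angular_include line remove_subfolder → Spec_get_angular_include line remove_subfolder (get_angular_include line remove_subfolder)

-- ===== LEMMAS AND PROOFS =====

-- index (from the front) of the last occurrence of c, given c occurs
def lastIdx (c : Char) : List Char → Nat
  | [] => 0
  | _ :: t => if c ∈ t then lastIdx c t + 1 else 0

theorem pfx_singleton (c : Char) (t : List Char) : [c].isPrefixOf t = true ↔ t.head? = some c := by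
  cases t with
  | nil => simp [List.isPrefixOf]
  | cons a t => simp only [List.isPrefixOf, List.isPrefixOf_nil_left, Bool.and_true, beq_iff_eq, List.head?_cons, Option.some.injEq]; exact eq_comm

theorem exists_first_split {c : Char} {s : List Char} (h : c ∈ s) :
    ∃ u v, s = u ++ c :: v ∧ c ∉ u := by
  induction s with
  | nil => cases h
  | cons a t ih =>
    by_cases ha : a = c
    · exact ⟨[], t, by simp [ha], by simp⟩
    · rcases ih (by rcases List.mem_cons.mp h with h' | h'; exacts [absurd h'.symm ha, h']) with ⟨u, v, hs, hu⟩
      exact ⟨a :: u, v, by simp [hs], by simp [hu]; exact fun h' => ha h'.symm⟩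

theorem exists_last_split {c : Char} {s : List Char} (h : c ∈ s) :
    ∃ p w, s = p ++ c :: w ∧ c ∉ w := by
  induction s with
  | nil => cases h
  | cons a t ih =>
    by_cases ht : c ∈ t
    · rcases ih ht with ⟨p, w, hs, hw⟩
      exact ⟨a :: p, w, by simp [hs], hw⟩
    · have ha : a = c := by rcases List.mem_cons.mp h with h' | h'; exacts [h'.symm, absurd h' ht]
      exact ⟨[], t, by simp [ha], ht⟩

theorem lastIdx_eq (c : Char) (p w : List Char) (hw : c ∉ w) :
    lastIdx c (p ++ c :: w) = p.length := by
  induction p with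
  | nil => simp [lastIdx, hw]
  | cons a p ih => simp [lastIdx, List.mem_append, ih]

theorem getD_append_len (p t : List Char) (d : Char) : (p ++ t).getD p.length d = t.head?.getD d := by
  induction p with
  | nil => cases t <;> simp [List.getD]
  | cons a p ih => simpa using ih

theorem rfind_go_after (c : Char) (p w : List Char) (hw : c ∉ w) :
    ∀ m, PySem.Chars.rfind.go (p ++ c :: w) [c] (p.length + m) = p.length := by
  intro m
  induction m with
  | zero =>
    cases hp : p.length with
    | zero =>
      have : p = [] := List.eq_nil_of_length_eq_zero hp
      subst this
      simp [PySem.Chars.rfind.go, (pfx_singleton c (c :: w)).mpr rfl]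
    | succ q =>
      have hdrop : (p ++ c :: w).drop (q + 1) = c :: w := by
        rw [← hp]; exact List.drop_left ..
      simp [PySem.Chars.rfind.go, hdrop, (pfx_singleton c (c :: w)).mpr rfl]
  | succ m ih =>
    have hdrop : (p ++ c :: w).drop (p.length + m + 1) = w.drop m := by
      have : (p ++ c :: w) = (p ++ [c]) ++ w := by simp
      rw [this]
      have hl : (p ++ [c]).length = p.length + 1 := by simp
      calc ((p ++ [c]) ++ w).drop (p.length + m + 1)
          = ((p ++ [c]) ++ w).drop ((p ++ [c]).length + m) := by rw [hl]; ring_nf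
        _ = w.drop m := List.drop_length_add_append m
    have hnp : ¬ ([c].isPrefixOf ((p ++ c :: w).drop (p.length + m + 1)) = true) := by
      rw [hdrop]
      intro h
      exact hw (List.mem_of_mem_drop (List.mem_of_mem_head? ((pfx_singleton c _).mp h)))
    have : p.length + (m + 1) = (p.length + m) + 1 := by ring
    rw [this]
    simp only [PySem.Chars.rfind.go]
    simp [hnp, ih]

theorem rfind_go_none (c : Char) (s : List Char) (h : c ∉ s) :
    ∀ j, PySem.Chars.rfind.go s [c] j = -1 := by
  intro j
  induction j with
  | zero =>
    have : ¬ ([c].isPrefixOf s = true) := fun hp => h (List.mem_of_mem_head? ((pfx_singleton c _).mp hp))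
    simp [PySem.Chars.rfind.go, this]
  | succ j ih =>
    have : ¬ ([c].isPrefixOf (s.drop (j+1)) = true) := fun hp =>
      h (List.mem_of_mem_drop (List.mem_of_mem_head? ((pfx_singleton c _).mp hp)))
    simp [PySem.Chars.rfind.go, this, ih]

theorem rfind_last (c : Char) (p w : List Char) (hw : c ∉ w) :
    PySem.Chars.rfind (p ++ c :: w) [c] = p.length := by
  have h := rfind_go_after c p w hw (w.length + 1)
  unfold PySem.Chars.rfind
  simpa [Nat.add_comm, Nat.add_assoc, Nat.add_left_comm] using h

theorem rfind_none (c : Char) (s : List Char) (h : c ∉ s) :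
    PySem.Chars.rfind s [c] = -1 := by
  unfold PySem.Chars.rfind; exact rfind_go_none c s h _

theorem find_go_first (c : Char) (u v : List Char) (hu : c ∉ u) :
    ∀ k, PySem.Chars.find.go [c] (u ++ c :: v) k = k + u.length := by
  induction u with
  | nil =>
    intro k
    simp [PySem.Chars.find.go, (pfx_singleton c (c :: v)).mpr rfl]
  | cons a t ih =>
    intro k
    have hna : ¬ ([c].isPrefixOf (a :: (t ++ c :: v)) = true) := by
      rw [pfx_singleton]; simp; intro h; exact hu (by simp [h])
    simp only [List.cons_append, PySem.Chars.find.go]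
    rw [if_neg hna]
    have := ih (fun h => hu (List.mem_cons_of_mem a h)) (k + 1)
    rw [this]; push_cast [List.length_cons]; ring

theorem find_first (c : Char) (u v : List Char) (hu : c ∉ u) :
    PySem.Chars.find (u ++ c :: v) [c] = u.length := by
  unfold PySem.Chars.find
  simpa using find_go_first c u v hu 0

theorem find_go_none (c : Char) (s : List Char) (h : c ∉ s) :
    ∀ k, PySem.Chars.find.go [c] s k = -1 := by
  induction s with
  | nil => intro k; simp [PySem.Chars.find.go]
  | cons a t ih =>
    intro k
    have hna : ¬ ([c].isPrefixOf (a :: t) = true) := by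
      rw [pfx_singleton]; simp; intro h'; exact h (by simp [h'])
    simp only [PySem.Chars.find.go]
    rw [if_neg hna]
    exact ih (fun h' => h (List.mem_cons_of_mem a h')) (k + 1)

theorem find_none (c : Char) (s : List Char) (h : c ∉ s) :
    PySem.Chars.find s [c] = -1 := by
  unfold PySem.Chars.find; exact find_go_none c s h 0

theorem rfind_mem (c : Char) (cs : List Char) (h : c ∈ cs) :
    PySem.Chars.rfind cs [c] = (lastIdx c cs : Int) := by
  obtain ⟨p, w, hcs, hw⟩ := exists_last_split h
  rw [hcs, rfind_last c p w hw, lastIdx_eq c p w hw]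

theorem foldA_none (l : List Nat) : l.foldl gaiStepA none = none := by
  induction l with
  | nil => rfl
  | cons a t ih => simpa [gaiStepA] using ih

theorem take_bd (p : List Char) (x : Char) (t : List Char) : (p ++ x :: t).take p.length = p :=
  List.take_left ..
theorem drop_bd (p : List Char) (x : Char) (t : List Char) : (p ++ x :: t).drop (p.length + 1) = t := by
  have := List.drop_length_add_append (l₁ := p) (l₂ := x :: t) 1
  simpa using this

theorem tailThm (v : List Char) : ∀ (pre : List Char) (i0 i1 : Nat),
    (List.range' pre.length v.length 1).foldl gaiStepA (some (false, i0, i1, pre ++ v))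
    = some (false, i0, (if '"' ∈ v then pre.length + lastIdx '"' v else i1),
        pre ++ v.map (fun c => if c = '"' then '>' else c)) := by
  induction v with
  | nil => intro pre i0 i1; simp
  | cons c t ih =>
    intro pre i0 i1
    rw [List.length_cons, List.range'_succ, List.foldl_cons]
    by_cases hc : c = '"'
    · subst hc
      have hstep : gaiStepA (some (false, i0, i1, pre ++ '"' :: t)) pre.length
          = some (false, i0, pre.length, (pre ++ ['>']) ++ t) := by
        simp [gaiStepA, getD_append_len, take_bd, drop_bd]
      rw [hstep]
      have hlen : pre.length + 1 = (pre ++ ['>']).length := by simp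
      rw [hlen, ih (pre ++ ['>']) i0 pre.length]
      by_cases ht : '"' ∈ t
      · simp [lastIdx, ht]; omega
      · simp [lastIdx, ht]
    · have hstep : gaiStepA (some (false, i0, i1, pre ++ c :: t)) pre.length
          = some (false, i0, i1, (pre ++ [c]) ++ t) := by
        simp [gaiStepA, getD_append_len, hc]
      rw [hstep]
      have hlen : pre.length + 1 = (pre ++ [c]).length := by simp
      rw [hlen, ih (pre ++ [c]) i0 i1]
      by_cases ht : '"' ∈ t
      · simp [lastIdx, ht, hc]; omega
      · simp [lastIdx, ht, hc]
        exact fun h => absurd h.symm hc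

theorem headNoQ (s : List Char) : ∀ (pre : List Char) (first : Bool) (i0 i1 : Nat), '"' ∉ s →
    (List.range' pre.length s.length 1).foldl gaiStepA (some (first, i0, i1, pre ++ s))
    = some (first, i0, i1, pre ++ s) := by
  induction s with
  | nil => intro pre first i0 i1 _; simp
  | cons c t ih =>
    intro pre first i0 i1 hs
    rw [List.length_cons, List.range'_succ, List.foldl_cons]
    have hc : ¬ (c = '"') := fun h => hs (by simp [h])
    have hstep : gaiStepA (some (first, i0, i1, pre ++ c :: t)) pre.length
        = some (first, i0, i1, (pre ++ [c]) ++ t) := by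
      simp [gaiStepA, getD_append_len, hc]
    rw [hstep]
    have hlen : pre.length + 1 = (pre ++ [c]).length := by simp
    rw [hlen, ih (pre ++ [c]) first i0 i1 (fun h => hs (List.mem_cons_of_mem c h))]
    simp

theorem headQ (u : List Char) : ∀ (v pre : List Char), '"' ∉ u →
    (List.range' pre.length (u ++ '"' :: v).length 1).foldl gaiStepA (some (true, 0, 0, pre ++ (u ++ '"' :: v)))
    = if v.head?.getD ' ' = '.' then none
      else some (false, pre.length + u.length + 1,
           (if '"' ∈ v then pre.length + u.length + 1 + lastIdx '"' v else 0),
           pre ++ u ++ '<' :: v.map (fun c => if c = '"' then '>' else c)) := by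
  induction u with
  | nil =>
    intro v pre _
    rw [List.nil_append, List.length_cons, List.range'_succ, List.foldl_cons]
    have hla : (pre ++ '"' :: v).getD (pre.length + 1) ' ' = v.head?.getD ' ' := by
      have h1 : pre ++ '"' :: v = (pre ++ ['"']) ++ v := by simp
      have hl : pre.length + 1 = (pre ++ ['"']).length := by simp
      rw [h1, hl, getD_append_len]
    have hla' : (pre ++ '"' :: v)[pre.length + 1]?.getD ' ' = v.head?.getD ' ' := by
      simpa [List.getD] using hla
    by_cases hdot : v.head?.getD ' ' = '.'
    · have hstep : gaiStepA (some (true, 0, 0, pre ++ '"' :: v)) pre.length = none := by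
        simp [gaiStepA, getD_append_len, hla', hdot]
      rw [hstep, foldA_none, if_pos hdot]
    · have hstep : gaiStepA (some (true, 0, 0, pre ++ '"' :: v)) pre.length
          = some (false, pre.length + 1, 0, (pre ++ ['<']) ++ v) := by
        simp [gaiStepA, getD_append_len, hla', hdot, take_bd, drop_bd]
      rw [hstep]
      have hlen : pre.length + 1 = (pre ++ ['<']).length := by simp
      rw [hlen, tailThm v (pre ++ ['<']) ((pre ++ ['<']).length) 0, if_neg hdot]
      by_cases hv : '"' ∈ v
      · simp [hv]
        try omega
      · simp [hv]
  | cons a u' ih =>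
    intro v pre hu
    have ha : ¬ (a = '"') := fun h => hu (by simp [h])
    rw [List.cons_append, List.length_cons, List.range'_succ, List.foldl_cons]
    have hstep : gaiStepA (some (true, 0, 0, pre ++ a :: (u' ++ '"' :: v))) pre.length
        = some (true, 0, 0, (pre ++ [a]) ++ (u' ++ '"' :: v)) := by
      simp [gaiStepA, getD_append_len, ha]
    have hnl : pre ++ a :: (u' ++ '"' :: v) = pre ++ (a :: (u' ++ '"' :: v)) := rfl
    rw [hnl, hstep]
    have hlen : pre.length + 1 = (pre ++ [a]).length := by simp
    rw [hlen, ih v (pre ++ [a]) (fun h => hu (List.mem_cons_of_mem a h))]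
    by_cases hdot : v.head?.getD ' ' = '.'
    · simp [hdot]
    · by_cases hv : '"' ∈ v
      · simp [hdot, hv, List.append_assoc]
        try omega
      · simp [hdot, hv, List.append_assoc]
        try omega

theorem gwsGen (t : List Char) : ∀ (pre : List Char) (st : Int × Option Nat),
    (List.range' pre.length t.length 1).foldl (gwsStep (pre ++ t)) st =
      ((if '/' ∈ t then ((pre.length + lastIdx '/' t : Nat) : Int) else st.1),
       (if '<' ∈ t then some (pre.length + lastIdx '<' t) else st.2)) := by
  induction t with
  | nil => intro pre st; simp
  | cons c t ih =>
    intro pre st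
    rw [List.length_cons, List.range'_succ, List.foldl_cons]
    have hg : (pre ++ c :: t).getD pre.length ' ' = c := by
      rw [getD_append_len]; rfl
    have hstep : gwsStep (pre ++ c :: t) st pre.length
        = (if c = '/' then ((pre.length : Int), st.2)
           else if c = '<' then (st.1, some pre.length) else st) := by
      by_cases h1 : c = '/'
      · simp [gwsStep, hg, h1]
      · by_cases h2 : c = '<' <;> simp [gwsStep, hg, h1, h2]
    rw [hstep]
    have hre : pre ++ c :: t = (pre ++ [c]) ++ t := by simp
    have hlen : pre.length + 1 = (pre ++ [c]).length := by simp
    rw [hre, hlen, ih (pre ++ [c])]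
    by_cases h1 : c = '/' <;> by_cases h2 : c = '<' <;>
      by_cases h3 : '/' ∈ t <;> by_cases h4 : '<' ∈ t <;>
      simp [lastIdx, h1, h2, h3, h4, eq_comm] <;> try omega

theorem gwsLoopThm (cs : List Char) : gwsLoop cs =
    ((if '/' ∈ cs then ((lastIdx '/' cs : Nat) : Int) else -1),
     (if '<' ∈ cs then some (lastIdx '<' cs) else none)) := by
  unfold gwsLoop
  rw [List.range_eq_range']
  simpa using gwsGen cs [] (-1, none)

theorem gws_eq (cs : List Char) (h : '/' ∈ cs → '<' ∈ cs) :
    get_without_subfolder cs = gws_alt cs := by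
  unfold get_without_subfolder gws_alt
  rw [gwsLoopThm]
  by_cases hs : '/' ∈ cs
  · have hlt := h hs
    have e1 : PySem.Chars.rfind cs ['/'] = (lastIdx '/' cs : Int) := rfind_mem _ _ hs
    have e2 : PySem.Chars.rfind cs ['<'] = (lastIdx '<' cs : Int) := rfind_mem _ _ hlt
    have ne1 : ¬ (((lastIdx '/' cs : Nat) : Int) = -1) := by omega
    simp [hs, hlt, e1, e2, ne1]
  · have e1 : PySem.Chars.rfind cs ['/'] = -1 := rfind_none _ _ hs
    simp [hs, e1]

-- ===== VERDICT (by name: the statement is the Claim_ definition above) =====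
theorem get_angular_include_spec : Claim_equal_get_angular_include := by
  intro line rs _ hpre
  obtain ⟨hpre1, hpre2⟩ := hpre
  unfold Spec_get_angular_include
  by_cases hq : '"' ∈ line.toList
  · obtain ⟨u, v, hcs, hu⟩ := exists_first_split hq
    simp only [get_angular_include, get_angular_include_alt]
    rw [hcs, List.range_eq_range']
    have hA := headQ u v [] hu
    simp only [List.nil_append, List.length_nil, Nat.zero_add] at hA
    rw [hA]
    have hf : PySem.Chars.find (u ++ '"' :: v) ['"'] = (u.length : Int) := find_first '"' u v hu
    rw [hf]
    have hfne : ¬ ((u.length : Int) = -1) := by omega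
    rw [if_neg hfne]
    have hget : PySem.List.pyGet? (u ++ '"' :: v) ((u.length : Int) + 1) = v.head? := by
      have h1 : ((u.length : Int) + 1) = (((u.length + 1 : Nat)) : Int) := by push_cast; ring
      have h2 : u ++ '"' :: v = (u ++ ['"']) ++ v := by simp
      rw [h1, PySem.List.pyGet?_natCast, h2, List.getElem?_append_right (by simp)]
      simp
      cases v <;> rfl
    rw [hget]
    by_cases hdot : v.head?.getD ' ' = '.'
    · rw [if_pos hdot, if_pos hdot]
    · rw [if_neg hdot, if_neg hdot]
      have hnlB : List.take ((u.length : Int)).toNat (u ++ '"' :: v) ++ '<' ::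
            PySem.Chars.join [] (List.map (fun c => [if c = '"' then '>' else c])
              (List.drop (((u.length : Int)).toNat + 1) (u ++ '"' :: v)))
          = u ++ '<' :: v.map (fun c => if c = '"' then '>' else c) := by
        have hcomp : (fun c => [if c = '"' then '>' else c])
            = (fun x => [x]) ∘ (fun c => if c = '"' then '>' else c) := rfl
        rw [Int.toNat_natCast, List.take_left, drop_bd, hcomp, ← List.map_map,
            PySem.Chars.join_nil_singletons]
      rw [hnlB]
      by_cases hv : '"' ∈ v
      · obtain ⟨p2, w2, hv2, hw2⟩ := exists_last_split hv
        have hli : lastIdx '"' v = p2.length := by rw [hv2]; exact lastIdx_eq '"' p2 w2 hw2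
        have hrf : PySem.Chars.rfind (u ++ '"' :: v) ['"'] = ((u.length + 1 + p2.length : Nat) : Int) := by
          have h3 : u ++ '"' :: v = (u ++ '"' :: p2) ++ '"' :: w2 := by simp [hv2]
          rw [h3, rfind_last '"' _ _ hw2]
          simp
          omega
        have himp : '/' ∈ u ++ '<' :: v.map (fun c => if c = '"' then '>' else c)
            → '<' ∈ u ++ '<' :: v.map (fun c => if c = '"' then '>' else c) := fun _ => by simp
        rw [hrf, if_pos hv, hli]
        simp only [Int.toNat_natCast, gws_eq _ himp]
        rfl
      · have hrf : PySem.Chars.rfind (u ++ '"' :: v) ['"'] = (u.length : Int) :=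
          rfind_last '"' u v hv
        rw [hrf, if_neg hv]
        have hsl1 : PySem.List.slice (u ++ '<' :: v.map (fun c => if c = '"' then '>' else c))
            (some ((u.length + 1 : Nat) : Int)) (some ((0 : Nat) : Int)) = [] := by
          rw [PySem.List.slice_natCast]
          simp
        have hsl2 : PySem.List.slice (u ++ '<' :: v.map (fun c => if c = '"' then '>' else c))
            (some ((u.length + 1 : Nat) : Int)) (some ((u.length : Nat) : Int)) = [] := by
          rw [PySem.List.slice_natCast]
          simp
        have himp : '/' ∈ u ++ '<' :: v.map (fun c => if c = '"' then '>' else c)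
            → '<' ∈ u ++ '<' :: v.map (fun c => if c = '"' then '>' else c) := fun _ => by simp
        simp only [Int.toNat_natCast]
        simp only [hsl1, hsl2]
        simp only [gws_eq _ himp]
  · simp only [get_angular_include, get_angular_include_alt]
    rw [List.range_eq_range']
    have hA := headNoQ line.toList [] true 0 0 hq
    simp only [List.nil_append, List.length_nil] at hA
    rw [hA]
    have hf : PySem.Chars.find line.toList ['"'] = -1 := find_none _ _ hq
    rw [hf]
    cases rs with
    | false => simp
    | true =>
      have himp : '/' ∈ line.toList → '<' ∈ line.toList := by
        intro hsl
        by_contra hlt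
        exact hpre2 ⟨rfl, hsl, hq, hlt⟩
      simp [gws_eq line.toList himp]
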